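-- pv_equiv track=rewrite | github.com/tajpatel58/Machine-Learning- | Project Euler/Spiral Primes.py | diagonal_generator
-- ===== SOURCE A (Python) =====
-- def diagonal_generator(n):
--     list_diagonal = []
--     counter = n ** 2
--     index = n - 1
--     for j in range(1, 5):
--         list_diagonal.append(counter)
--         counter = counter - index
--
--     return list_diagonal
-- ===== SOURCE B (Python) =====
-- def diagonal_generator(n):
--     # Recursively build the list back-to-front: start from the smallest
--     # corner n**2 - 3*(n-1) and climb upward by d = n - 1, appending each
--     # value AFTER the recursive call so the largest corner n**2 ends up first.
--     d = n - 1
--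
--     def climb(v, k):
--         if k == 0:
--             return []
--         return climb(v + d, k - 1) + [v]
--
--     return climb(n ** 2 - 3 * d, 4)
-- ===== Notes on version B (the rewrite author's own statement) =====
-- stated objective: alternative
-- what changed: Replaces the forward accumulator loop (running counter decremented by n-1 each step) with a recursive back-to-front construction that starts from the smallest corner n**2-3*(n-1) and climbs upward by n-1, appending after the recursive call so the list comes out descending.
import Mathlib
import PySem

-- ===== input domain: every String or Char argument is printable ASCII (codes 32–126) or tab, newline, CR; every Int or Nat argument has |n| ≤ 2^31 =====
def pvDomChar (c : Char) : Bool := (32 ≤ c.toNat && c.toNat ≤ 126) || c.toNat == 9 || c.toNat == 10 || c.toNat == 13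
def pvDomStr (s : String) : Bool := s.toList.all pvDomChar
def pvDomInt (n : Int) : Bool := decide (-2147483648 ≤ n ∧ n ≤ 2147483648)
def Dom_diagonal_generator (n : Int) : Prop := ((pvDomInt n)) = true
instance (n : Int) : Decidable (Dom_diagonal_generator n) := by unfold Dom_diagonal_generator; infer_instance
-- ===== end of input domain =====

-- B builds the list back-to-front by recursion from the smallest corner, climbing by n-1 (alternative decomposition).


-- ===== PORT A =====
-- literal port of A: fold over range(1,5) threading (list_diagonal, counter)
def diagonal_generator (n : Int) : List Int :=
  let counter : Int := n ^ 2
  let index : Int := n - 1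
  let st := (PySem.List.pyRange 1 5 1).foldl
    (fun (st : List Int × Int) _ => (st.1 ++ [st.2], st.2 - index))
    (([] : List Int), counter)
  st.1

-- ===== PORT B =====
-- helper 'climb' of Source B: append v AFTER the recursive call on v + d
def pvClimb (d : Int) (v : Int) : Nat → List Int
  | 0 => []
  | k + 1 => pvClimb d (v + d) k ++ [v]

-- port of B: recursive back-to-front build from the smallest corner
def diagonal_generator_alt (n : Int) : List Int :=
  let d : Int := n - 1
  pvClimb d (n ^ 2 - 3 * d) 4

-- ===== PRECONDITION & SPEC =====
def Spec_diagonal_generator (n : Int) (out : List Int) : Prop := out = diagonal_generator_alt n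
instance (n : Int) (out : List Int) : Decidable (Spec_diagonal_generator n out) := by unfold Spec_diagonal_generator; infer_instance

-- ===== CLAIM =====
def Claim_equal_diagonal_generator : Prop := ∀ (n : Int), Dom_diagonal_generator n → Spec_diagonal_generator n (diagonal_generator n)

-- ===== LEMMAS AND PROOFS =====

-- ===== VERDICT =====
theorem diagonal_generator_spec : Claim_equal_diagonal_generator := by
  intro n _
  unfold Spec_diagonal_generator diagonal_generator diagonal_generator_alt
  simp [PySem.List.pyRange, List.range_succ, pvClimb]
  and_intros <;> ring
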